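-- pv_equiv track=rewrite | github.com/tbnsok40/Algorithm-Python | 20NOV/17NOV 비밀지도.py | solution
-- ===== SOURCE A (Python) =====
-- def solution(n, arr1, arr2):
--     arr1_, arr2_,big = [],[],[]
--     for a, b in zip(arr1, arr2):
--         small = ''
--         # 여기를 굳이 for문으로 분해할 필요가 없었다.
--         for i in bin(a | b)[2:]:
--             small += i
--         while len(small) != n:
--             small = '0' + small
--         # replace 연속 사용 가능
--         big.append(small.replace('0',' ').replace('1','#'))
--     return big
-- ===== SOURCE B (Python) =====
-- def solution(n, arr1, arr2):
--     out = []
--     for a, b in zip(arr1, arr2):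
--         m = a | b
--         out.append(''.join('#' if (m >> (n - 1 - i)) & 1 else ' ' for i in range(n)))
--     return out
-- ===== Notes on version B (the rewrite author's own statement) =====
-- stated objective: idiomatic
-- what changed: B reads each row's characters directly by arithmetic bit tests ((m >> (n-1-i)) & 1) and joins them, replacing A's bin() string, char-copy loop, while-loop left-padding and the two .replace() passes.
-- outside the precondition, e.g. on solution(4, [-1], [0]): A returns ['  b#'], B returns ['####']
import Mathlib
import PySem

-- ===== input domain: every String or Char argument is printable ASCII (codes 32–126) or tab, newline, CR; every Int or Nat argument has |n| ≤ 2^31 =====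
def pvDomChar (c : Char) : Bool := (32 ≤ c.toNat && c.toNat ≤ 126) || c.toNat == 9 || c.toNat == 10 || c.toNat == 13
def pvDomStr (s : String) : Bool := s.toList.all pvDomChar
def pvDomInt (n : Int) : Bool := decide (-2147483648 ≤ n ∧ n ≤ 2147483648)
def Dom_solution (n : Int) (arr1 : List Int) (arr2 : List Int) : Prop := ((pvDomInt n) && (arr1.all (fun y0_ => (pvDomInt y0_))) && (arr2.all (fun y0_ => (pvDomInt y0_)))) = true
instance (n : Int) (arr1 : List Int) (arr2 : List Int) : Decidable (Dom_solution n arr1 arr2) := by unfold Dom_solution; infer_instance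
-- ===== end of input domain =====

-- B replaces A's bin()/manual pad/.replace pipeline by direct per-bit tests; equal on nonnegative
-- rows that fit in n bits (Pre_), where A terminates.

-- ===== PORT A =====
-- the 'while len(small) != n' loop, with fuel; inside Pre_ the fuel is never exhausted
def pvPadWhile : Nat → Int → List Char → List Char
  | 0, _, s => s
  | f + 1, n, s => if PySem.List.len s ≠ n then pvPadWhile f n ('0' :: s) else s

def pvRowA (n : Int) (a : Int) (b : Int) : String :=
  -- for i in bin(a|b)[2:]: small += i
  let small : List Char :=
    (PySem.List.slice (PySem.Int.toBinChars0b (PySem.Int.bor a b)) (some 2) none).foldl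
      (fun s c => s ++ [c]) []
  let small := pvPadWhile (n.toNat + 1) n small
  String.mk ((small.map (fun c => if c = '0' then ' ' else c)).map
    (fun c => if c = '1' then '#' else c))

def solution (n : Int) (arr1 : List Int) (arr2 : List Int) : List String :=
  (arr1.zip arr2).foldl (fun big p => big ++ [pvRowA n p.1 p.2]) []

-- ===== PORT B =====
def pvRowB (n : Int) (a : Int) (b : Int) : String :=
  let m := PySem.Int.bor a b
  String.mk ((PySem.List.pyRange 0 n 1).map
    (fun i => if PySem.Int.band (m >>> (n - 1 - i).toNat) 1 ≠ 0 then '#' else ' '))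

def solution_alt (n : Int) (arr1 : List Int) (arr2 : List Int) : List String :=
  (arr1.zip arr2).map (fun p => pvRowB n p.1 p.2)

-- ===== PRECONDITION & SPEC =====
-- Pre_ excludes rows with a negative entry (bin()'s sign makes A keep a literal 'b' in the map, an
-- artefact of slicing '-0b…'[2:]) and rows not fitting in n bits or n < 1 with nonempty rows, where
-- A's while-loop never terminates.
def Pre_solution (n : Int) (arr1 : List Int) (arr2 : List Int) : Prop :=
  ∀ p ∈ arr1.zip arr2, 0 ≤ p.1 ∧ 0 ≤ p.2 ∧ 1 ≤ n ∧ (PySem.Int.bor p.1 p.2) >>> n.toNat = 0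
instance (n : Int) (arr1 : List Int) (arr2 : List Int) : Decidable (Pre_solution n arr1 arr2) := by
  unfold Pre_solution; infer_instance
def pvWitness_solution : Int × List Int × List Int := (5, [9, 20, 28, 18, 11], [30, 1, 21, 17, 28])

def Spec_solution (n : Int) (arr1 : List Int) (arr2 : List Int) (out : List String) : Prop := out = solution_alt n arr1 arr2
instance (n : Int) (arr1 : List Int) (arr2 : List Int) (out : List String) : Decidable (Spec_solution n arr1 arr2 out) := by unfold Spec_solution; infer_instance

-- ===== CLAIM (what is proved, stated in full; the proofs are below) =====
def Claim_equal_solution : Prop := ∀ (n : Int) (arr1 : List Int) (arr2 : List Int), Dom_solution n arr1 arr2 → Pre_solution n arr1 arr2 → Spec_solution n arr1 arr2 (solution n arr1 arr2)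

-- ===== LEMMAS AND PROOFS =====

-- Nat.toDigitsCore ignores extra fuel (as long as the fuel covers the number)
lemma pv_tdc_fuel (f : Nat) : ∀ (g n : Nat) (acc : List Char), 1 ≤ f → 1 ≤ g →
    n < 2 ^ f → n < 2 ^ g → Nat.toDigitsCore 2 f n acc = Nat.toDigitsCore 2 g n acc := by
  induction f with
  | zero => intro g n acc hf; omega
  | succ f ih =>
    intro g n acc _ hg hnf hng
    match g, hg with
    | g + 1, _ =>
      simp only [Nat.toDigitsCore]
      by_cases h : n / 2 = 0
      · simp [h]
      · simp only [h]
        have hn2 : 2 ≤ n := by omega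
        have hf1 : 1 ≤ f := by
          by_contra hc
          have : f = 0 := by omega
          subst this; simp at hnf; omega
        have hg1 : 1 ≤ g := by
          by_contra hc
          have : g = 0 := by omega
          subst this; simp at hng; omega
        exact ih g (n / 2) _ hf1 hg1 (by omega) (by omega)

-- the accumulator can be pulled out
lemma pv_tdc_acc (f : Nat) : ∀ (n : Nat) (acc : List Char),
    Nat.toDigitsCore 2 f n acc = Nat.toDigitsCore 2 f n [] ++ acc := by
  induction f with
  | zero => intro n acc; simp [Nat.toDigitsCore]
  | succ f ih =>
    intro n acc
    simp only [Nat.toDigitsCore]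
    by_cases h : n / 2 = 0
    · simp [h]
    · simp only [h, if_neg, not_false_iff]
      rw [ih (n / 2) ((n % 2).digitChar :: acc), ih (n / 2) [(n % 2).digitChar]]
      simp

lemma pv_toDigits_lt_two (n : Nat) (h : n < 2) : Nat.toDigits 2 n = [n.digitChar] := by
  interval_cases n <;> rfl

lemma pv_toDigits_step (n : Nat) (h : 2 ≤ n) :
    Nat.toDigits 2 n = Nat.toDigits 2 (n / 2) ++ [(n % 2).digitChar] := by
  have h2 : n / 2 ≠ 0 := by omega
  conv_lhs => rw [Nat.toDigits]
  simp only [Nat.toDigitsCore, h2, if_neg, not_false_iff]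
  rw [pv_tdc_acc]
  congr 1
  rw [Nat.toDigits]
  exact pv_tdc_fuel n (n / 2 + 1) (n / 2) [] (by omega) (by omega)
    (by calc n / 2 ≤ n := Nat.div_le_self n 2
          _ < 2 ^ n := Nat.lt_two_pow_self)
    (by calc n / 2 < 2 ^ (n / 2) := Nat.lt_two_pow_self
          _ ≤ 2 ^ (n / 2 + 1) := Nat.pow_le_pow_right (by omega) (by omega))

-- the padded binary string, as A computes it, equals the msb-first bit map
lemma pv_padded_eq (k : Nat) : ∀ (M : Nat), 1 ≤ k → M < 2 ^ k →
    List.replicate (k - (Nat.toDigits 2 M).length) '0' ++ Nat.toDigits 2 M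
      = (List.range k).reverse.map (fun i => if M.testBit i then '1' else '0') := by
  induction k with
  | zero => intro M h; omega
  | succ k ih =>
    intro M _ hM
    have hrange : (List.range (k + 1)).reverse.map (fun i => if M.testBit i then '1' else '0')
        = (List.range k).reverse.map (fun i => if (M / 2).testBit i then '1' else '0')
          ++ [if M.testBit 0 then '1' else '0'] := by
      rw [List.range_succ_eq_map]
      simp only [List.reverse_cons, List.map_append]
      congr 1
      rw [List.map_reverse, List.map_map, List.map_reverse, List.reverse_inj]
      apply List.map_congr_left
      intro i _
      simp [Function.comp, Nat.testBit_succ]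
    rw [hrange]
    have hd0 : (if M.testBit 0 then '1' else '0') = (M % 2).digitChar := by
      rcases Nat.mod_two_eq_zero_or_one M with h | h <;> simp [Nat.testBit_zero, h] <;> rfl
    by_cases hk : k = 0
    · subst hk
      have hM2 : M < 2 := by omega
      rw [pv_toDigits_lt_two M hM2]
      have : (M % 2).digitChar = M.digitChar := by rw [Nat.mod_eq_of_lt hM2]
      simp only [hd0, this]
      interval_cases M <;> rfl
    · have hk1 : 1 ≤ k := by omega
      by_cases hM2 : M < 2
      · rw [pv_toDigits_lt_two M hM2]
        have h0 : M / 2 = 0 := by omega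
        rw [h0]
        have hmap : (List.range k).reverse.map
            (fun i => if (0 : Nat).testBit i then '1' else '0') = List.replicate k '0' := by
          simp [Nat.zero_testBit, List.map_const']
        rw [hmap]
        have e1 : k + 1 - [M.digitChar].length = k := by simp
        rw [e1]
        congr 1
        interval_cases M <;> rfl
      · replace hM2 : 2 ≤ M := by omega
        rw [pv_toDigits_step M hM2]
        have hlen : (Nat.toDigits 2 (M / 2) ++ [(M % 2).digitChar]).length
            = (Nat.toDigits 2 (M / 2)).length + 1 := by simp
        rw [hlen]
        have := ih (M / 2) hk1 (by omega)
        rw [← this, hd0]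
        have : k + 1 - ((Nat.toDigits 2 (M / 2)).length + 1)
            = k - (Nat.toDigits 2 (M / 2)).length := by omega
        rw [this, ← List.append_assoc]

-- the fuelled while-loop is left-padding with zeros
lemma pv_padWhile_eq (f : Nat) : ∀ (n : Int) (s : List Char), 0 ≤ n →
    s.length ≤ n.toNat → n.toNat - s.length < f →
    pvPadWhile f n s = List.replicate (n.toNat - s.length) '0' ++ s := by
  induction f with
  | zero => intro n s _ _ h; omega
  | succ f ih =>
    intro n s hn hle hf
    simp only [pvPadWhile, PySem.List.len_eq]
    by_cases h : (s.length : Int) = n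
    · have : n.toNat - s.length = 0 := by omega
      simp [h, this]
    · have hlt : s.length < n.toNat := by omega
      simp only [h, ne_eq, not_false_iff, if_pos]
      rw [ih n ('0' :: s) hn (by simp; omega) (by simp; omega)]
      have : n.toNat - s.length = (n.toNat - ('0' :: s).length) + 1 := by simp; omega
      rw [this, List.replicate_succ']
      simp

-- reversed range as a map
lemma pv_reverse_range (k : Nat) :
    (List.range k).reverse = (List.range k).map (fun j => k - 1 - j) := by
  apply List.ext_getElem
  · simp
  · intro i h1 h2
    simp only [List.length_reverse, List.length_range] at h1
    rw [List.getElem_reverse]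
    simp

-- the two rows agree under the row precondition
lemma pv_row_eq (n a b : Int) (ha : 0 ≤ a) (hb : 0 ≤ b) (hn : 1 ≤ n)
    (hfit : (PySem.Int.bor a b) >>> n.toNat = 0) : pvRowA n a b = pvRowB n a b := by
  set M := a.toNat ||| b.toNat with hMdef
  have hk1 : 1 ≤ n.toNat := by omega
  have hbor : PySem.Int.bor a b = (M : Int) := PySem.Int.bor_of_nonneg ha hb
  have hMlt : M < 2 ^ n.toNat := by
    rw [hbor, ← Int.natCast_shiftRight] at hfit
    have h0 : M >>> n.toNat = 0 := by exact_mod_cast hfit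
    rw [Nat.shiftRight_eq_div_pow] at h0
    exact Nat.lt_of_div_eq_zero (Nat.two_pow_pos n.toNat) h0
  have hlen : (Nat.toDigits 2 M).length ≤ n.toNat := Nat.toDigits_length 2 M n.toNat hk1 hMlt
  have hsmall : (PySem.List.slice (PySem.Int.toBinChars0b (PySem.Int.bor a b)) (some 2) none).foldl
      (fun s c => s ++ [c]) ([] : List Char) = Nat.toDigits 2 M := by
    rw [PySem.List.foldl_append_singleton, hbor]
    have h0b : PySem.Int.toBinChars0b (M : Int) = '0' :: 'b' :: Nat.toDigits 2 M := by
      simp [PySem.Int.toBinChars0b]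
    rw [h0b, PySem.List.slice_from ('0' :: 'b' :: Nat.toDigits 2 M) (a := 2) (by omega)]
    simp
  -- A side
  simp only [pvRowA]
  rw [hsmall,
    pv_padWhile_eq (n.toNat + 1) n (Nat.toDigits 2 M) (by omega) hlen (by omega),
    pv_padded_eq n.toNat M hk1 hMlt]
  -- collapse the two replaces over the 0/1 bit string
  have hrepl : (((List.range n.toNat).reverse.map (fun i => if M.testBit i then '1' else '0')).map
      (fun c => if c = '0' then ' ' else c)).map (fun c => if c = '1' then '#' else c)
      = (List.range n.toNat).reverse.map (fun i => if M.testBit i then '#' else ' ') := by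
    simp only [List.map_map]
    apply List.map_congr_left
    intro i _
    by_cases h : M.testBit i <;> simp [h, Function.comp]
  rw [hrepl]
  -- B side
  simp only [pvRowB]
  rw [hbor, PySem.List.pyRange_one]
  congr 1
  rw [pv_reverse_range, List.map_map, List.map_map]
  simp only [sub_zero]
  apply List.map_congr_left
  intro j hj
  simp only [List.mem_range] at hj
  simp only [Function.comp]
  have hsub : (n - 1 - (0 + (j : Int))).toNat = n.toNat - 1 - j := by omega
  rw [hsub, ← Int.natCast_shiftRight, PySem.Int.band_one]
  have hmodc : PySem.Int.mod ((M >>> (n.toNat - 1 - j) : Nat) : Int) 2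
      = (((M >>> (n.toNat - 1 - j)) % 2 : Nat) : Int) := by
    exact_mod_cast PySem.Int.mod_natCast (M >>> (n.toNat - 1 - j)) 2
  rw [hmodc]
  have hband : M >>> (n.toNat - 1 - j) % 2 = M / 2 ^ (n.toNat - 1 - j) % 2 := by
    rw [Nat.shiftRight_eq_div_pow]
  have htb : M.testBit (n.toNat - 1 - j) = decide (M / 2 ^ (n.toNat - 1 - j) % 2 = 1) :=
    Nat.testBit_eq_decide_div_mod_eq
  by_cases h : M / 2 ^ (n.toNat - 1 - j) % 2 = 1
  · simp [htb, h, hband]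
  · have h0 : M / 2 ^ (n.toNat - 1 - j) % 2 = 0 := by omega
    simp [htb, hband, h0]

-- ===== VERDICT (by name: the statement is the Claim_ definition above) =====
theorem solution_spec : Claim_equal_solution := by
  intro n arr1 arr2 _ hpre
  unfold Spec_solution solution solution_alt
  rw [PySem.List.foldl_append_singleton_eq_map]
  simp only [List.nil_append]
  apply List.map_congr_left
  intro p hp
  obtain ⟨ha, hb, hn, hfit⟩ := hpre p hp
  exact pv_row_eq n p.1 p.2 ha hb hn hfit
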